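-- pv_equiv track=rewrite | github.com/kingbj940429/Coding_Test_Solution | beak_joon/b_4659.py | check_double_chars
-- ===== SOURCE A (Python) =====
-- def check_double_chars(input_data):
--     flag = True
--
--     for i in range(len(input_data) - 1):
--         if(input_data[i] == input_data[i+1]):
--             temp_data = input_data[i] + input_data[i+1]
--             if(temp_data not in possible_double_chars):
--                 flag = False
--                 break
--
--     return flag
--
-- possible_double_chars = ['ee', 'oo']
-- ===== SOURCE B (Python) =====
-- possible_double_chars = ['ee', 'oo']
--
-- def check_double_chars(input_data):
--     # Split into maximal runs of equal elements; a run of length >= 2 must be an allowed double.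
--     i, n = 0, len(input_data)
--     while i < n:
--         j = i
--         while j < n and input_data[j] == input_data[i]:
--             j += 1
--         if j - i >= 2 and input_data[i] + input_data[i] not in possible_double_chars:
--             return False
--         i = j
--     return True
-- ===== Notes on version B (the rewrite author's own statement) =====
-- stated objective: alternative
-- what changed: B replaces A's pairwise index scan with a run-length decomposition: it finds each maximal run of equal characters and tests the doubled character once per run instead of once per adjacent pair.
import Mathlib
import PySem

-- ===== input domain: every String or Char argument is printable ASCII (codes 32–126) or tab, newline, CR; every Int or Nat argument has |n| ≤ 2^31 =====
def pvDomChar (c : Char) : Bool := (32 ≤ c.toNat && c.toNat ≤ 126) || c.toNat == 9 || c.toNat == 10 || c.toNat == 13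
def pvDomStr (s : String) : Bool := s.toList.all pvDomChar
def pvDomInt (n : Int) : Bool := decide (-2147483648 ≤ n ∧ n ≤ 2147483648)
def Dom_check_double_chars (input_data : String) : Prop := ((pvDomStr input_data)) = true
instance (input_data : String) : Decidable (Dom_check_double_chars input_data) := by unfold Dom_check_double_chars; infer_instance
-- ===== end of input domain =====

-- B replaces A's pairwise index scan with a run-length (groupby-style) decomposition; same cost, different traversal.


-- ===== PORT A =====
def possible_double_chars : List String := ["ee", "oo"]

-- A's loop over i in range(len-1): test input[i] == input[i+1], break with flag=False when the pair is not allowed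
def checkPairsA : List Char → Bool
  | c1 :: c2 :: rest =>
      if c1 == c2 then
        if possible_double_chars.contains (String.ofList [c1, c2]) then checkPairsA (c2 :: rest)
        else false
      else checkPairsA (c2 :: rest)
  | _ => true

def check_double_chars (input_data : String) : Bool := checkPairsA input_data.toList

-- ===== PORT B =====
-- B's inner while loop extends the current run (c, k = run char and its length so far);
-- at a run boundary the finished run is tested: length ≥ 2 must be an allowed double.
def checkRunsB : Char → Nat → List Char → Bool
  | c, k, [] => decide (k < 2) || possible_double_chars.contains (String.ofList [c, c])
  | c, k, d :: rest =>
      if d == c then checkRunsB c (k + 1) rest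
      else (decide (k < 2) || possible_double_chars.contains (String.ofList [c, c])) && checkRunsB d 1 rest

def check_double_chars_alt (input_data : String) : Bool :=
  match input_data.toList with
  | [] => true
  | c :: rest => checkRunsB c 1 rest

-- ===== PRECONDITION & SPEC =====
def Spec_check_double_chars (input_data : String) (out : Bool) : Prop := out = check_double_chars_alt input_data
instance (input_data : String) (out : Bool) : Decidable (Spec_check_double_chars input_data out) := by unfold Spec_check_double_chars; infer_instance

-- ===== CLAIM (what is proved, stated in full; the proofs are below) =====
def Claim_equal_check_double_chars : Prop := ∀ (input_data : String), Dom_check_double_chars input_data → Spec_check_double_chars input_data (check_double_chars input_data)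

-- ===== LEMMAS AND PROOFS =====

theorem checkRunsB_eq (rest : List Char) : ∀ (c : Char) (k : Nat), 1 ≤ k →
    checkRunsB c k rest = ((decide (k < 2) || possible_double_chars.contains (String.ofList [c, c])) && checkPairsA (c :: rest)) := by
  induction rest with
  | nil => intro c k _; simp [checkRunsB, checkPairsA]
  | cons d rest ih =>
      intro c k hk
      by_cases hdc : d = c
      · subst hdc
        have h2 : ¬ (k + 1 < 2) := by omega
        cases hcc : possible_double_chars.contains (String.ofList [d, d]) <;>
          simp [checkRunsB, checkPairsA, ih d (k + 1) (by omega), h2]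
        simp at hcc
        exact fun hm _ => absurd hm hcc
      · have hne : (d == c) = false := by simp [hdc]
        have hne' : (c == d) = false := by simp; exact fun h => hdc h.symm
        simp [checkRunsB, checkPairsA, hne, hne', ih d 1 (by omega)]

-- ===== VERDICT (by name: the statement is the Claim_ definition above) =====
theorem check_double_chars_spec : Claim_equal_check_double_chars := by
  intro input_data _
  unfold Spec_check_double_chars check_double_chars check_double_chars_alt
  cases h : input_data.toList with
  | nil => simp [checkPairsA]
  | cons c rest => simp [checkRunsB_eq rest c 1 (by omega)]
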